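-- pv_equiv track=rewrite | github.com/BorisKa-maker/infosearch | spell checker/Classifaer_Iterations.py | join_generator
-- ===== SOURCE A (Python) =====
-- import itertools
--
-- def join_generator(request):
--     indexes = [i for i in range(len(request)) if request[i] == ' ']
--     indexes = [indexes[i] - i -1 for i in range(len(indexes))]
--     request = list(''.join(request.split()))
--     x = len(indexes)-1
--     all_comb = [itertools.combinations(indexes,i) for i in range(x if x > 0 else 0,len(indexes)+1)]
--     strings = []
--     for combins in all_comb:
--         for comb in combins:
--             new_req = list(request)
--             k=0
--             for i in comb:
--                 new_req.insert(i+k+1,' ')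
--                 k+=1
--             strings.append(''.join(new_req))
--     return strings
-- ===== SOURCE B (Python) =====
-- def join_generator(request):
--     # positions of ' ' shifted by how many spaces precede them, minus 1
--     pts = []
--     cnt = 0
--     for i, ch in enumerate(request):
--         if ch == ' ':
--             pts.append(i - cnt - 1)
--             cnt += 1
--     s = ''.join(request.split())
--
--     def place(points):
--         pieces = []
--         prev = 0
--         for c in points:
--             cut = c + 1
--             pieces.append(s[prev:cut])
--             prev = cut
--         pieces.append(s[prev:])
--         return ' '.join(pieces)
--
--     if not pts:
--         return [s]
--     res = [place(pts[:j] + pts[j + 1:]) for j in reversed(range(len(pts)))]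
--     res.append(place(pts))
--     return res
-- ===== Notes on version B (the rewrite author's own statement) =====
-- stated objective: simpler
-- what changed: A generates itertools.combinations of the insertion points for sizes n-1 and n and performs repeated list.insert calls with a shifting offset; B observes that these are exactly the leave-one-out variants (in reversed index order) plus the full variant, and builds each variant directly by slicing the space-free string at the kept cut points and joining with ' '.
import Mathlib
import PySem

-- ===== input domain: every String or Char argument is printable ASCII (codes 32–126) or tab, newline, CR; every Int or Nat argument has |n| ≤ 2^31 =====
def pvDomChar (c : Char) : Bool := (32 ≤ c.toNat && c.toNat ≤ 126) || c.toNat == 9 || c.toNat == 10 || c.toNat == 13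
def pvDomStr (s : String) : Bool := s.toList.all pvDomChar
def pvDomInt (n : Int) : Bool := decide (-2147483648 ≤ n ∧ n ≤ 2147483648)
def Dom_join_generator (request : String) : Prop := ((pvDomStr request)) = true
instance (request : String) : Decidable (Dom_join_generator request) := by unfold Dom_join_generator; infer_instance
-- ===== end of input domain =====

-- B replaces A's itertools.combinations machinery (which only ever uses sizes n-1 and n) by direct
-- leave-one-out slicing of the space-free string; objective: simpler.

-- ===== PORT A =====
-- itertools.combinations, in the order itertools yields it
def pyCombinations {α : Type} : List α → Nat → List (List α)
  | _, 0 => [[]]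
  | [], _ + 1 => []
  | x :: xs, k + 1 => (pyCombinations xs k).map (x :: ·) ++ pyCombinations xs (k + 1)

-- A's inner loop: new_req = list(request); k = 0; for i in comb: new_req.insert(i+k+1, ' '); k += 1; ''.join(new_req)
def aInsertAll (req : List Char) (comb : List Int) : String :=
  String.ofList (comb.foldl (fun (st : List Char × Int) i =>
    (PySem.List.insert st.1 (i + st.2 + 1) ' ', st.2 + 1)) (req, 0)).1

def join_generator (request : String) : List String :=
  let indexes : List Int :=
    (PySem.List.pyRange 0 (PySem.Str.len request) 1).filter
      (fun i => PySem.List.pyGet? request.toList i == some ' ')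
  let indexes : List Int :=
    (PySem.List.pyRange 0 (indexes.length : Int) 1).map
      (fun i => PySem.List.pyGetD indexes i 0 - i - 1)
  let req : List Char := PySem.Chars.join [] (PySem.Chars.split₀ request.toList)
  let x : Int := (indexes.length : Int) - 1
  let all_comb : List (List (List Int)) :=
    (PySem.List.pyRange (if x > 0 then x else 0) ((indexes.length : Int) + 1) 1).map
      (fun i => pyCombinations indexes i.toNat)
  all_comb.foldl (fun strings combins =>
    combins.foldl (fun strings comb => strings ++ [aInsertAll req comb]) strings) []

-- ===== PORT B =====
-- Source B's nested `place`: pieces of s cut at c+1 for c in points, joined by ' '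
def bPlace (s : List Char) (points : List Int) : String :=
  let st := points.foldl (fun (st : List (List Char) × Int) c =>
      (st.1 ++ [PySem.List.slice s (some st.2) (some (c + 1))], c + 1)) ([], 0)
  String.ofList (PySem.Chars.join [' '] (st.1 ++ [PySem.List.slice s (some st.2) none]))

def join_generator_alt (request : String) : List String :=
  let pts : List Int :=
    ((PySem.List.enumerate request.toList).foldl
      (fun (st : List Int × Int) p =>
        if p.2 == ' ' then (st.1 ++ [p.1 - st.2 - 1], st.2 + 1) else st)
      ([], 0)).1
  let s : List Char := PySem.Chars.join [] (PySem.Chars.split₀ request.toList)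
  if pts = [] then [String.ofList s]
  else
    ((PySem.List.pyRange 0 (pts.length : Int) 1).reverse).map
      (fun j => bPlace s (PySem.List.slice pts none (some j) ++ PySem.List.slice pts (some (j + 1)) none))
    ++ [bPlace s pts]

-- ===== PRECONDITION & SPEC =====
def Spec_join_generator (request : String) (out : List String) : Prop := out = join_generator_alt request
instance (request : String) (out : List String) : Decidable (Spec_join_generator request out) := by unfold Spec_join_generator; infer_instance

-- ===== CLAIM (what is proved, stated in full; the proofs are below) =====
def Claim_equal_join_generator : Prop := ∀ (request : String), Dom_join_generator request → Spec_join_generator request (join_generator request)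

-- ===== LEMMAS AND PROOFS =====

-- positions of ' ' in cs, counting from i
def posI : List Char → Int → List Int
  | [], _ => []
  | ch :: t, i => if ch = ' ' then i :: posI t (i + 1) else posI t (i + 1)

-- the transformed insertion points: i - cnt - 1 at each space (cnt = spaces seen so far)
def canon : List Char → Int → Int → List Int
  | [], _, _ => []
  | ch :: t, i, cnt =>
    if ch = ' ' then (i - cnt - 1) :: canon t (i + 1) (cnt + 1) else canon t (i + 1) cnt

-- A's insertion loop on Nat cut points (d = (c+1).toNat), k spaces already inserted
def insGoN : List Char → List Nat → Nat → List Char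
  | t, [], _ => t
  | t, d :: ds, k => insGoN (t.take (d + k) ++ ' ' :: t.drop (d + k)) ds (k + 1)

-- B's pieces on Nat cut points
def piecesN (s : List Char) : Nat → List Nat → List (List Char)
  | prev, [] => [s.drop prev]
  | prev, d :: ds => (s.drop prev).take (d - prev) :: piecesN s d ds

theorem insert_nat (l : List Char) (p : Nat) (v : Char) :
    PySem.List.insert l (p : Int) v = l.take p ++ v :: l.drop p := by
  simp [PySem.List.insert, PySem.List.sliceIndices]
  split_ifs with h'
  · exact absurd h' (by omega)
  · have hmin : (min (p : Int) (l.length : Int)).toNat = min p l.length := by omega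
    rw [hmin]
    rcases le_total p l.length with h | h
    · rw [min_eq_left h]
    · rw [min_eq_right h, List.take_of_length_le h, List.take_of_length_le (le_refl _),
        List.drop_of_length_le h, List.drop_of_length_le (le_refl _)]

theorem filter_posI (cs : List Char) : ∀ (pre : List Char),
    (PySem.List.pyRange (pre.length : Int) ((pre.length : Int) + (cs.length : Int)) 1).filter
      (fun i => PySem.List.pyGet? (pre ++ cs) i == some ' ') = posI cs (pre.length : Int) := by
  induction cs with
  | nil =>
    intro pre
    rw [PySem.List.pyRange_one_eq_nil (by simp)]
    rfl
  | cons ch t ih =>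
    intro pre
    have hlen : ((pre ++ [ch]).length : Int) = (pre.length : Int) + 1 := by
      simp
    rw [List.append_cons pre ch t]
    rw [show ((pre.length : Int) + ((ch :: t).length : Int))
        = ((pre ++ [ch]).length : Int) + (t.length : Int) by rw [hlen]; push_cast [List.length_cons]; ring]
    rw [PySem.List.pyRange_one_cons (by rw [hlen]; omega)]
    rw [List.filter_cons]
    rw [show (pre.length : Int) + 1 = ((pre ++ [ch]).length : Int) from hlen.symm]
    rw [ih (pre ++ [ch])]
    have hget : PySem.List.pyGet? ((pre ++ [ch]) ++ t) ((pre.length : Int)) = some ch := by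
      rw [PySem.List.pyGet?_natCast, List.getElem?_append_left (by simp),
        List.getElem?_append_right (le_refl _)]
      simp
    simp only [hget, hlen]
    by_cases h : ch = ' '
    · simp [posI, h]
    · simp [posI, h]

theorem enum_posI (cs : List Char) : ∀ (i cnt : Int),
    (PySem.List.enumerate (posI cs i) cnt).map (fun p => p.2 - p.1 - 1) = canon cs i cnt := by
  induction cs with
  | nil => intro i cnt; simp [posI, canon, PySem.List.enumerate_nil]
  | cons ch t ih =>
    intro i cnt
    by_cases h : ch = ' '
    · subst h
      rw [show posI (' ' :: t) i = i :: posI t (i + 1) from by simp [posI]]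
      rw [show canon (' ' :: t) i cnt = (i - cnt - 1) :: canon t (i + 1) (cnt + 1) from by
        simp [canon]]
      rw [PySem.List.enumerate_cons]
      simp only [List.map_cons, ih]
    · simp only [posI, canon, if_neg h]
      exact ih (i + 1) cnt

theorem bfold_canon (cs : List Char) : ∀ (i : Int) (acc : List Int) (cnt : Int),
    (PySem.List.enumerate cs i).foldl
      (fun (st : List Int × Int) p =>
        if p.2 == ' ' then (st.1 ++ [p.1 - st.2 - 1], st.2 + 1) else st) (acc, cnt)
    = (acc ++ canon cs i cnt, cnt + (cs.countP (· == ' ') : Int)) := by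
  induction cs with
  | nil => intro i acc cnt; simp [canon, PySem.List.enumerate_nil]
  | cons ch t ih =>
    intro i acc cnt
    rw [PySem.List.enumerate_cons, List.foldl_cons]
    by_cases h : ch = ' '
    · subst h
      simp only [beq_self_eq_true, if_true]
      rw [ih]
      simp only [Prod.mk.injEq, canon, List.countP_cons, beq_self_eq_true, if_true]
      refine ⟨by simp, by push_cast; ring⟩
    · have hb : (ch == ' ') = false := by simp [h]
      simp only [hb, Bool.false_eq_true, if_false]
      rw [ih]
      simp [canon, h, hb]

theorem canon_lb (cs : List Char) : ∀ (i cnt c : Int), c ∈ canon cs i cnt → i - cnt - 1 ≤ c := by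
  induction cs with
  | nil => intro i cnt c hc; simp [canon] at hc
  | cons ch t ih =>
    intro i cnt c hc
    simp only [canon] at hc
    split_ifs at hc with h
    · rcases List.mem_cons.mp hc with rfl | hc'
      · omega
      · have := ih (i + 1) (cnt + 1) c hc'; omega
    · have := ih (i + 1) cnt c hc; omega

theorem canon_pairwise (cs : List Char) : ∀ (i cnt : Int), (canon cs i cnt).Pairwise (· ≤ ·) := by
  induction cs with
  | nil => intro i cnt; simp [canon]
  | cons ch t ih =>
    intro i cnt
    simp only [canon]
    split_ifs with h
    · refine List.pairwise_cons.mpr ⟨?_, ih _ _⟩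
      intro c hc
      have := canon_lb t (i + 1) (cnt + 1) c hc
      omega
    · exact ih _ _

theorem comb_gt {α : Type} (l : List α) : ∀ (k : Nat), l.length < k → pyCombinations l k = [] := by
  induction l with
  | nil =>
    intro k hk
    cases k with
    | zero => omega
    | succ m => rfl
  | cons x xs ih =>
    intro k hk
    cases k with
    | zero => simp at hk
    | succ m =>
      simp only [List.length_cons] at hk
      simp only [pyCombinations]
      rw [ih m (by omega), ih (m + 1) (by omega)]
      rfl

theorem comb_full {α : Type} (l : List α) : pyCombinations l l.length = [l] := by
  induction l with
  | nil => rfl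
  | cons x xs ih =>
    simp only [List.length_cons, pyCombinations, ih, comb_gt xs (xs.length + 1) (by omega)]
    rfl

theorem comb_pred {α : Type} (l : List α) : ∀ (n : Nat), l.length = n + 1 →
    pyCombinations l n = ((List.range (n + 1)).reverse).map (fun j => l.eraseIdx j) := by
  induction l with
  | nil => intro n h; simp at h
  | cons x xs ih =>
    intro n h
    cases n with
    | zero =>
      have hx : xs = [] := by
        have : xs.length = 0 := by simpa using h
        exact List.length_eq_zero_iff.mp this
      subst hx
      simp [pyCombinations, List.range_one]
    | succ m =>
      have hxs : xs.length = m + 1 := by simpa using h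
      have h1 : pyCombinations xs (m + 1) = [xs] := by rw [← hxs]; exact comb_full xs
      have hr : (List.map (fun j => (x :: xs).eraseIdx j) ((List.range (m + 1 + 1)).reverse))
          = List.map (fun j => x :: xs.eraseIdx j) ((List.range (m + 1)).reverse) ++ [xs] := by
        rw [show m + 1 + 1 = (m + 1) + 1 from rfl, List.range_succ_eq_map, List.reverse_cons,
          List.map_append, ← List.map_reverse, List.map_map]
        simp [Function.comp_def, List.eraseIdx_cons_succ, Nat.succ_eq_add_one]
      simp only [pyCombinations]
      rw [ih m hxs, h1, hr, List.map_map]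
      simp [Function.comp_def]

theorem piecesN_cons_shape (s : List Char) (prev : Nat) (ds : List Nat) :
    ∃ y ys, piecesN s prev ds = y :: ys := by
  cases ds <;> exact ⟨_, _, rfl⟩

theorem main_join (s : List Char) (ds : List Nat) : ∀ (prev k : Nat) (P : List Char),
    P.length = min prev s.length + k → (∀ d ∈ ds, prev ≤ d) → ds.Pairwise (· ≤ ·) →
    insGoN (P ++ s.drop prev) ds k = P ++ PySem.Chars.join [' '] (piecesN s prev ds) := by
  induction ds with
  | nil =>
    intro prev k P _ _ _
    simp [insGoN, piecesN, PySem.Chars.join_singleton]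
  | cons d ds ih =>
    intro prev k P hP hlb hpw
    obtain ⟨hd_all, hpw'⟩ := List.pairwise_cons.mp hpw
    have hpd : prev ≤ d := hlb d List.mem_cons_self
    have hPle : P.length ≤ d + k := by
      rcases le_total prev s.length with h | h
      · rw [min_eq_left h] at hP; omega
      · rw [min_eq_right h] at hP; omega
    have htake : (P ++ s.drop prev).take (d + k) = P ++ (s.drop prev).take (d - prev) := by
      rw [List.take_append, List.take_of_length_le hPle]
      congr 1
      rcases le_total prev s.length with h | h
      · rw [min_eq_left h] at hP; congr 1; omega
      · rw [List.drop_of_length_le h]; simp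
    have hdrop : (P ++ s.drop prev).drop (d + k) = s.drop d := by
      rw [List.drop_append, List.drop_of_length_le hPle, List.nil_append]
      rcases le_total prev s.length with h | h
      · rw [min_eq_left h] at hP
        rw [List.drop_drop]
        congr 1
        omega
      · rw [List.drop_of_length_le h, List.drop_of_length_le (le_trans h hpd)]
        simp
    simp only [insGoN]
    rw [htake, hdrop]
    have harg : (P ++ (s.drop prev).take (d - prev)) ++ ' ' :: s.drop d
        = (P ++ (s.drop prev).take (d - prev) ++ [' ']) ++ s.drop d := by simp
    rw [harg]
    have hP' : (P ++ (s.drop prev).take (d - prev) ++ [' ']).length = min d s.length + (k + 1) := by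
      simp only [List.length_append, List.length_take, List.length_drop, List.length_cons,
        List.length_nil]
      rcases le_total prev s.length with h | h <;> rcases le_total d s.length with h2 | h2
      · rw [min_eq_left h] at hP
        rw [min_eq_left h2, min_eq_left (show d - prev ≤ s.length - prev by omega)]
        omega
      · rw [min_eq_left h] at hP
        rw [min_eq_right h2, min_eq_right (show s.length - prev ≤ d - prev by omega)]
        omega
      · rw [min_eq_right h] at hP
        rw [min_eq_left h2, min_eq_left (show d - prev ≤ s.length - prev by omega)]
        omega
      · rw [min_eq_right h] at hP
        rw [min_eq_right h2, min_eq_right (show s.length - prev ≤ d - prev by omega)]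
        omega
    rw [ih d (k + 1) _ hP' hd_all hpw']
    obtain ⟨y, ys, hy⟩ := piecesN_cons_shape s d ds
    simp only [piecesN, hy, PySem.Chars.join_cons_cons]
    simp [List.append_assoc]

theorem afold_insGoN (comb : List Int) : ∀ (t : List Char) (k : Nat),
    (∀ c ∈ comb, (0 : Int) ≤ c + 1) →
    (comb.foldl (fun (st : List Char × Int) i =>
      (PySem.List.insert st.1 (i + st.2 + 1) ' ', st.2 + 1)) (t, (k : Int))).1
    = insGoN t (comb.map (fun c => (c + 1).toNat)) k := by
  induction comb with
  | nil => intro t k _; rfl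
  | cons c cs ih =>
    intro t k h
    have h0 : (0 : Int) ≤ c + 1 := h c List.mem_cons_self
    simp only [List.foldl_cons, List.map_cons, insGoN]
    have hc : c + (k : Int) + 1 = (((c + 1).toNat + k : Nat) : Int) := by push_cast; omega
    rw [hc, insert_nat]
    have hk : ((k : Int) + 1) = (((k + 1 : Nat)) : Int) := by push_cast; ring
    rw [hk, ih _ (k + 1) (fun c' hc' => h c' (List.mem_cons_of_mem _ hc'))]

theorem bfold_piecesN (s : List Char) (comb : List Int) : ∀ (acc : List (List Char)) (prev : Nat),
    (∀ c ∈ comb, (prev : Int) ≤ c + 1) → comb.Pairwise (· ≤ ·) →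
    (comb.foldl (fun (st : List (List Char) × Int) c =>
        (st.1 ++ [PySem.List.slice s (some st.2) (some (c + 1))], c + 1)) (acc, (prev : Int))).1
      ++ [PySem.List.slice s (some ((comb.foldl (fun (st : List (List Char) × Int) c =>
        (st.1 ++ [PySem.List.slice s (some st.2) (some (c + 1))], c + 1)) (acc, (prev : Int))).2)) none]
    = acc ++ piecesN s prev (comb.map (fun c => (c + 1).toNat)) := by
  induction comb with
  | nil =>
    intro acc prev _ _
    simp [piecesN, PySem.List.slice_from_natCast]
  | cons c cs ih =>
    intro acc prev hlb hpw
    obtain ⟨hd_all, hpw'⟩ := List.pairwise_cons.mp hpw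
    have h0 : (prev : Int) ≤ c + 1 := hlb c List.mem_cons_self
    have h1 : (0 : Int) ≤ c + 1 := le_trans (Int.natCast_nonneg prev) h0
    have hc : c + 1 = (((c + 1).toNat : Nat) : Int) := by omega
    simp only [List.foldl_cons, List.map_cons, piecesN]
    rw [PySem.List.slice_toNat s (Int.natCast_nonneg prev) h1, Int.toNat_natCast]
    have hih := ih (acc ++ [List.take ((c + 1).toNat - prev) (List.drop prev s)]) ((c + 1).toNat)
      (fun c' hc' => by have := hd_all c' hc'; omega) hpw'
    rw [← hc] at hih
    rw [hih]
    simp [List.append_assoc]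

theorem variant_eq (s : List Char) (comb : List Int)
    (hlb : ∀ c ∈ comb, (0 : Int) ≤ c + 1) (hpw : comb.Pairwise (· ≤ ·)) :
    aInsertAll s comb = bPlace s comb := by
  unfold aInsertAll bPlace
  dsimp only
  have ha := afold_insGoN comb s 0 hlb
  simp only [Nat.cast_zero] at ha
  have hb := bfold_piecesN s comb [] 0 (fun c hc => by have := hlb c hc; push_cast; omega) hpw
  simp only [Nat.cast_zero, List.nil_append] at hb
  rw [ha, hb]
  have hm := main_join s (comb.map (fun c => (c + 1).toNat)) 0 0 []
    (by simp) (fun d _ => Nat.zero_le d)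
    (List.Pairwise.map _ (fun a b hab => by omega) hpw)
  simp only [List.nil_append, List.drop_zero] at hm
  rw [hm]

theorem range_two (a : Int) : PySem.List.pyRange a (a + 2) 1 = [a, a + 1] := by
  rw [PySem.List.pyRange_one_cons (by omega), PySem.List.pyRange_one_cons (by omega),
    PySem.List.pyRange_one_eq_nil (by omega)]

theorem ptsA_eq (request : String) :
    (PySem.List.pyRange 0 ((((PySem.List.pyRange 0 (PySem.Str.len request) 1).filter
        (fun i => PySem.List.pyGet? request.toList i == some ' ')).length : Int)) 1).map
      (fun i => PySem.List.pyGetD ((PySem.List.pyRange 0 (PySem.Str.len request) 1).filter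
        (fun i => PySem.List.pyGet? request.toList i == some ' ')) i 0 - i - 1)
    = canon request.toList 0 0 := by
  have hidx : (PySem.List.pyRange 0 (PySem.Str.len request) 1).filter
      (fun i => PySem.List.pyGet? request.toList i == some ' ') = posI request.toList 0 := by
    have h := filter_posI request.toList []
    simpa [PySem.Str.len_eq] using h
  rw [hidx]
  have h2 : ((PySem.List.enumerate (posI request.toList 0)).map (fun p => p.2 - p.1 - 1))
      = canon request.toList 0 0 := enum_posI request.toList 0 0
  rw [PySem.List.enumerate_eq_map_pyRange (posI request.toList 0) 0, List.map_map] at h2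
  simpa [Function.comp_def, PySem.List.len] using h2

theorem ptsB_eq (request : String) :
    ((PySem.List.enumerate request.toList).foldl
      (fun (st : List Int × Int) p =>
        if p.2 == ' ' then (st.1 ++ [p.1 - st.2 - 1], st.2 + 1) else st)
      ([], 0)).1 = canon request.toList 0 0 := by
  rw [bfold_canon request.toList 0 [] 0]
  simp

-- ===== VERDICT (by name: the statement is the Claim_ definition above) =====
theorem join_generator_spec : Claim_equal_join_generator := by
  intro request _
  unfold Spec_join_generator join_generator join_generator_alt
  simp only [ptsA_eq, ptsB_eq]
  have hlb : ∀ c ∈ canon request.toList 0 0, (0 : Int) ≤ c + 1 :=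
    fun c hc => by have := canon_lb request.toList 0 0 c hc; omega
  have hpw := canon_pairwise request.toList 0 0
  revert hlb hpw
  generalize PySem.Chars.join [] (PySem.Chars.split₀ request.toList) = s
  generalize canon request.toList 0 0 = pts
  intro hlb hpw
  rcases pts with _ | ⟨p, rest⟩
  · rw [if_pos rfl]
    simp only [List.length_nil, Nat.cast_zero]
    rw [if_neg (show ¬((0:Int) - 1 > 0) from by norm_num)]
    rw [PySem.List.pyRange_one_singleton 0]
    simp only [List.map_cons, List.map_nil, Int.toNat_zero]
    rw [show pyCombinations ([] : List Int) 0 = [[]] from rfl]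
    simp only [List.foldl_cons, List.foldl_nil, List.nil_append]
    rfl
  · have hne : p :: rest ≠ ([] : List Int) := by simp
    rw [if_neg hne]
    simp only [List.length_cons, Nat.cast_add, Nat.cast_one]
    have hif : (if ((rest.length : Int) + 1) - 1 > 0 then ((rest.length : Int) + 1) - 1 else 0)
        = ((rest.length : Nat) : Int) := by split_ifs <;> omega
    rw [hif]
    have hrange : PySem.List.pyRange ((rest.length : Int)) ((rest.length : Int) + 1 + 1) 1
        = [(rest.length : Int), (rest.length : Int) + 1] := by
      have h := range_two (rest.length : Int)
      rw [show (rest.length : Int) + 1 + 1 = (rest.length : Int) + 2 by ring]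
      exact h
    rw [hrange]
    simp only [List.map_cons, List.map_nil, List.foldl_cons, List.foldl_nil]
    rw [show ((rest.length : Int)).toNat = rest.length from Int.toNat_natCast _]
    rw [show ((rest.length : Int) + 1).toNat = rest.length + 1 by omega]
    have hfull : pyCombinations (p :: rest) (rest.length + 1) = [p :: rest] := by
      simpa using comb_full (p :: rest)
    have hpred : pyCombinations (p :: rest) rest.length
        = ((List.range (rest.length + 1)).reverse).map (fun j => (p :: rest).eraseIdx j) :=
      comb_pred (p :: rest) rest.length (by simp)
    rw [hfull, hpred]
    simp only [PySem.List.foldl_append_singleton_eq_map, List.nil_append]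
    rw [PySem.List.pyRange_one]
    simp only [zero_add, Int.sub_zero, List.map_map]
    rw [show (((rest.length : Int) + 1).toNat) = rest.length + 1 by omega]
    rw [← List.map_reverse, List.map_map]
    congr 1
    · refine List.map_congr_left ?_
      intro j hj
      simp only [Function.comp_def]
      rw [PySem.List.slice_to_natCast, show ((j : Int) + 1) = ((j + 1 : Nat) : Int) by push_cast; ring,
        PySem.List.slice_from_natCast, ← List.eraseIdx_eq_take_drop_succ]
      exact variant_eq s _
        (fun c hc => hlb c ((List.eraseIdx_sublist _ j).subset hc))
        (List.Pairwise.sublist (List.eraseIdx_sublist _ j) hpw)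
    · simp only [List.map_cons, List.map_nil]
      rw [variant_eq s (p :: rest) hlb hpw]
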